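-- pv_equiv track=rewrite | github.com/alyoexe/mini_project | prepare_feedback_dataset.py | split_feedback
-- ===== SOURCE A (Python) =====
-- def split_feedback(records):
--     yes_cases = []
--     no_cases = []
--     skipped = []
--
--     for row in records:
--         decision = row.get("decision", "").lower()
--         if decision == "yes":
--             yes_cases.append(row)
--         elif decision == "no":
--             no_cases.append(row)
--         else:
--             skipped.append(row)
--
--     return yes_cases, no_cases, skipped
-- ===== SOURCE B (Python) =====
-- def _decision(row):
--     return row.get("decision", "").lower()
--
-- def split_feedback(records):
--     yes_cases = [row for row in records if _decision(row) == "yes"]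
--     no_cases = [row for row in records if _decision(row) == "no"]
--     skipped = [row for row in records if _decision(row) not in ("yes", "no")]
--     return yes_cases, no_cases, skipped
-- ===== Notes on version B (the rewrite author's own statement) =====
-- stated objective: alternative
-- what changed: Replaces the single accumulating loop with three independent filter comprehensions over the records, one per output bucket.
import Mathlib
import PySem

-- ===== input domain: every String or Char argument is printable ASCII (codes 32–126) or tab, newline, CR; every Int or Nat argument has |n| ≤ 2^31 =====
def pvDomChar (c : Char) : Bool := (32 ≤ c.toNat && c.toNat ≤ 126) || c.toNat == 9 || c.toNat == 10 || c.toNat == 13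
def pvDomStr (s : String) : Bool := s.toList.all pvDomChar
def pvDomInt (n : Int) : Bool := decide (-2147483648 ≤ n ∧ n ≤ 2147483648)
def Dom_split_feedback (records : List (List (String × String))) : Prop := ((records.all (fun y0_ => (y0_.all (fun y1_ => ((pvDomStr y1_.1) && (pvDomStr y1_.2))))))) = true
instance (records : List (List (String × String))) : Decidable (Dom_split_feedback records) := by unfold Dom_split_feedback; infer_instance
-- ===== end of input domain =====

-- B replaces A's single accumulating loop by three independent filter passes (objective: alternative decomposition).


-- ===== PORT A =====
-- row.get("decision", "").lower() on the dict-as-association-list row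
def split_feedback (records : List (List (String × String))) : (List (List (String × String))) × (List (List (String × String))) × (List (List (String × String))) :=
  records.foldl
    (fun acc row =>
      let decision := PySem.Str.lower ((PySem.Dict.ofList row).getD "decision" "")
      if decision = "yes" then (acc.1 ++ [row], acc.2.1, acc.2.2)
      else if decision = "no" then (acc.1, acc.2.1 ++ [row], acc.2.2)
      else (acc.1, acc.2.1, acc.2.2 ++ [row]))
    ([], [], [])

-- ===== PORT B =====
-- helper _decision(row) of Source B
def pvDecisionB (row : List (String × String)) : String :=
  PySem.Str.lower ((PySem.Dict.ofList row).getD "decision" "")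

def split_feedback_alt (records : List (List (String × String))) : (List (List (String × String))) × (List (List (String × String))) × (List (List (String × String))) :=
  (records.filter (fun row => pvDecisionB row == "yes"),
   records.filter (fun row => pvDecisionB row == "no"),
   records.filter (fun row => !(pvDecisionB row == "yes" || pvDecisionB row == "no")))

-- ===== PRECONDITION & SPEC =====
def Spec_split_feedback (records : List (List (String × String))) (out : (List (List (String × String))) × (List (List (String × String))) × (List (List (String × String)))) : Prop := out = split_feedback_alt records
instance (records : List (List (String × String))) (out : (List (List (String × String))) × (List (List (String × String))) × (List (List (String × String)))) : Decidable (Spec_split_feedback records out) := by unfold Spec_split_feedback; infer_instance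

-- ===== CLAIM (what is proved, stated in full; the proofs are below) =====
def Claim_equal_split_feedback : Prop := ∀ (records : List (List (String × String))), Dom_split_feedback records → Spec_split_feedback records (split_feedback records)

-- ===== LEMMAS AND PROOFS =====

theorem split_feedback_fold (records : List (List (String × String)))
    (y n s : List (List (String × String))) :
    records.foldl
      (fun acc row =>
        let decision := PySem.Str.lower ((PySem.Dict.ofList row).getD "decision" "")
        if decision = "yes" then (acc.1 ++ [row], acc.2.1, acc.2.2)
        else if decision = "no" then (acc.1, acc.2.1 ++ [row], acc.2.2)
        else (acc.1, acc.2.1, acc.2.2 ++ [row]))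
      (y, n, s)
    = (y ++ records.filter (fun row => pvDecisionB row == "yes"),
       n ++ records.filter (fun row => pvDecisionB row == "no"),
       s ++ records.filter (fun row => !(pvDecisionB row == "yes" || pvDecisionB row == "no"))) := by
  induction records generalizing y n s with
  | nil => simp
  | cons r rs ih =>
    simp only [List.foldl_cons, List.filter_cons]
    by_cases hy : PySem.Str.lower ((PySem.Dict.ofList r).getD "decision" "") = "yes"
    · have e : pvDecisionB r = "yes" := hy
      simp only [hy, e, if_pos, ih]
      simp
    · by_cases hn : PySem.Str.lower ((PySem.Dict.ofList r).getD "decision" "") = "no"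
      · have e : pvDecisionB r = "no" := hn
        have e' : pvDecisionB r ≠ "yes" := hy
        simp only [hn, e, ih]
        simp
      · have e : pvDecisionB r ≠ "no" := hn
        have e' : pvDecisionB r ≠ "yes" := hy
        simp only [hy, hn, ih]
        simp [e, e']

-- ===== VERDICT (by name: the statement is the Claim_ definition above) =====
theorem split_feedback_spec : Claim_equal_split_feedback := by
  intro records _
  unfold Spec_split_feedback split_feedback split_feedback_alt
  rw [split_feedback_fold]
  simp
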